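-- pv_equiv track=rewrite | github.com/aditocco2/EECE590X | 13_Timing_in_Non-Ideal_Circuits/2_non_ideal_circuit/wave_utils.py | wavedrom_to_binary
-- ===== SOURCE A (Python) =====
-- def wavedrom_to_binary(wavedrom):
--
--     """
--     Turns a wavedrom signal (1..0..1.) into binary (11100011)
--     """
--
--     binary = ""
--     signal_value = ""
--
--     # Iterate through every character in the wavedrom signal
--     for i in wavedrom:
--         # Turn dots into 1 or 0 depending on what was last seen
--         if i == ".":
--             binary += signal_value
--         # Preserve 1s and 0s while noting what was last seen
--         else:
--             binary += i
--             signal_value = i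
--
--     return binary
-- ===== SOURCE B (Python) =====
-- def wavedrom_to_binary(wavedrom):
--     """
--     Turns a wavedrom signal (1..0..1.) into binary (11100011)
--     """
--     # Pass 1: group the string into (symbol, number-of-following-dots) runs;
--     # dots before the first symbol belong to no run and are dropped.
--     groups = []
--     i, n = 0, len(wavedrom)
--     while i < n:
--         c = wavedrom[i]
--         i += 1
--         if c == ".":
--             continue
--         run = 0
--         while i < n and wavedrom[i] == ".":
--             run += 1
--             i += 1
--         groups.append((c, run))
--     # Pass 2: expand each run.
--     return "".join(c * (run + 1) for c, run in groups)
-- ===== Notes on version B (the rewrite author's own statement) =====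
-- stated objective: alternative
-- what changed: B replaces A's stateful char-by-char forward-fill (carrying the last-seen symbol and appending it for each dot) by a two-pass group-then-expand strategy: first group the string into (symbol, dot-run-length) pairs, then join each symbol repeated 1+run times.
import Mathlib
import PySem

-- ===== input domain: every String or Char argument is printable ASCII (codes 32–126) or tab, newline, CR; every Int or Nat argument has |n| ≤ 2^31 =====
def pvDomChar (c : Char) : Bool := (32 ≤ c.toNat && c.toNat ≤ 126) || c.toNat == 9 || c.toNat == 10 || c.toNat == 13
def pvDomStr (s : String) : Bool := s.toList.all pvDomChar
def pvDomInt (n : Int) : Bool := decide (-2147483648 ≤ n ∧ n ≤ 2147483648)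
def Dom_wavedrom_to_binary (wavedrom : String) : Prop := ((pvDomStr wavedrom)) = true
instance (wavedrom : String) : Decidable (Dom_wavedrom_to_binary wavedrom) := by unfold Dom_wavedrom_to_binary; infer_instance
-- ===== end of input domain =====

-- B replaces A's stateful forward-fill by grouping the string into (symbol, dot-run) pairs
-- and expanding each run (objective: alternative decomposition, same cost).

-- ===== PORT A =====
-- A's loop: accumulate (binary, signal_value); signal_value is [] for "" or [c] for the
-- last non-dot character seen.
def wavedrom_to_binary (wavedrom : String) : String :=
  let st := wavedrom.toList.foldl
    (fun (st : List Char × List Char) i =>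
      if i = '.' then (st.1 ++ st.2, st.2) else (st.1 ++ [i], [i]))
    ([], [])
  String.mk st.1

-- ===== PORT B =====
-- pass 1 of Source B: group into (symbol, number of following dots); leading dots dropped.
def groupsB : List Char → List (Char × Nat)
  | [] => []
  | c :: t =>
    if c = '.' then groupsB t
    else (c, (t.takeWhile (· = '.')).length) :: groupsB (t.dropWhile (· = '.'))
  termination_by l => l.length
  decreasing_by
  · simp
  · have := List.length_dropWhile_le (p := (· = '.')) (l := t)
    simp; omega

-- pass 2 of Source B: expand each run to 1+run copies of its symbol.
def wavedrom_to_binary_alt (wavedrom : String) : String :=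
  String.mk ((groupsB wavedrom.toList).flatMap (fun g => List.replicate (g.2 + 1) g.1))

-- ===== PRECONDITION & SPEC =====
def Spec_wavedrom_to_binary (wavedrom : String) (out : String) : Prop := out = wavedrom_to_binary_alt wavedrom
instance (wavedrom : String) (out : String) : Decidable (Spec_wavedrom_to_binary wavedrom out) := by unfold Spec_wavedrom_to_binary; infer_instance

-- ===== CLAIM (what is proved, stated in full; the proofs are below) =====
def Claim_equal_wavedrom_to_binary : Prop := ∀ (wavedrom : String), Dom_wavedrom_to_binary wavedrom → Spec_wavedrom_to_binary wavedrom (wavedrom_to_binary wavedrom)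

-- ===== LEMMAS AND PROOFS =====

-- recursive form of A's fold body (binary part only)
def aRec : List Char → List Char → List Char
  | [], _ => []
  | c :: t, sv => if c = '.' then sv ++ aRec t sv else c :: aRec t [c]

theorem foldl_eq_aRec (l : List Char) (acc sv : List Char) :
    (l.foldl (fun (st : List Char × List Char) i =>
      if i = '.' then (st.1 ++ st.2, st.2) else (st.1 ++ [i], [i])) (acc, sv)).1
    = acc ++ aRec l sv := by
  induction l generalizing acc sv with
  | nil => simp [aRec]
  | cons c t ih =>
    by_cases h : c = '.' <;> simp [aRec, h, ih, List.append_assoc]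

theorem aRec_single (t : List Char) (c : Char) :
    aRec t [c] = List.replicate (t.takeWhile (· = '.')).length c
      ++ aRec (t.dropWhile (· = '.')) [c] := by
  induction t with
  | nil => simp
  | cons d t' ih =>
    by_cases h : d = '.'
    · simp [aRec, h, ih, List.replicate_succ]
    · simp [h]

theorem aRec_fresh (l : List Char) (c : Char) (h : l.head? ≠ some '.') :
    aRec l [c] = aRec l [] := by
  cases l with
  | nil => rfl
  | cons d t =>
    have hd : d ≠ '.' := by simpa using h
    simp [aRec, hd]

theorem aRec_eq_groups (l : List Char) :
    aRec l [] = (groupsB l).flatMap (fun g => List.replicate (g.2 + 1) g.1) := by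
  induction l using groupsB.induct with
  | case1 => simp [aRec, groupsB]
  | case2 t ih =>
    simp [aRec, groupsB, ih]
  | case3 c t h ih =>
    have hd : (t.dropWhile (· = '.')).head? ≠ some '.' := by
      intro hc
      have := List.head?_dropWhile_not (p := (· = '.')) (l := t)
      rw [hc] at this
      simp at this
    simp only [aRec, groupsB, if_neg h, List.flatMap_cons]
    rw [aRec_single, aRec_fresh _ _ hd, ih]
    simp [List.replicate_succ]

-- ===== VERDICT (by name: the statement is the Claim_ definition above) =====
theorem wavedrom_to_binary_spec : Claim_equal_wavedrom_to_binary := by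
  intro w _
  unfold Spec_wavedrom_to_binary wavedrom_to_binary wavedrom_to_binary_alt
  simp only []
  rw [foldl_eq_aRec, aRec_eq_groups]
  simp
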